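-- pv_equiv track=rewrite | github.com/francescozonaro/statsbombplot | common/loader.py | _expand_minute
-- ===== SOURCE A (Python) =====
-- def _expand_minute(minute: int, periods_duration):
--
--     expanded_minute = minute
--     periods_regular = [45, 45, 15, 15, 0]
--     for period in range(len(periods_duration) - 1):
--         if minute > sum(periods_regular[: period + 1]):
--             expanded_minute += periods_duration[period] - periods_regular[period]
--         else:
--             break
--     return expanded_minute
-- ===== SOURCE B (Python) =====
-- def _expand_minute(minute: int, periods_duration):
--     regular = [45, 45, 15, 15, 0]
--     cumulative = [45, 90, 105, 120, 120]
--     n = min(len(periods_duration) - 1, 5)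
--     return minute + sum(
--         periods_duration[p] - regular[p]
--         for p in range(n)
--         if minute > cumulative[p]
--     )
-- ===== Notes on version B (the rewrite author's own statement) =====
-- stated objective: simpler
-- what changed: Replaces the break-loop with repeated slice-sums by a precomputed cumulative-threshold table and one filtered sum (the break is redundant because the thresholds are non-decreasing).
import Mathlib
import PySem

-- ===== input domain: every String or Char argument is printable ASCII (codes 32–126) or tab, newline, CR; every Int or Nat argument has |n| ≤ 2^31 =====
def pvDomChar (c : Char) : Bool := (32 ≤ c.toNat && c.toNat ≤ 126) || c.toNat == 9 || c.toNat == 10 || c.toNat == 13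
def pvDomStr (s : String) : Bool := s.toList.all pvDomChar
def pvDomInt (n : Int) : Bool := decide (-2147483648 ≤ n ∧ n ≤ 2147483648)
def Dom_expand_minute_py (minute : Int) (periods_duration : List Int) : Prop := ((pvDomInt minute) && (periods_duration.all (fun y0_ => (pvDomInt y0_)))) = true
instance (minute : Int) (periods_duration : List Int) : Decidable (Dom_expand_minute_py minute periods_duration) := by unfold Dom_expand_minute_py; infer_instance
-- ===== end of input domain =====

-- B replaces A's break-loop with slice sums by a fixed cumulative table and one filtered sum (objective: simpler).

-- ===== PORT A =====
-- A's for-loop with break, over range(len(periods_duration)-1); the slice sum is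
-- recomputed each iteration exactly as in the Python.  Indexing uses pyGet? with a
-- default only at the IndexError point, which Pre_ excludes.
def expandLoopA (minute : Int) (pd : List Int) : List Int → Int → Int
  | [], acc => acc
  | p :: rest, acc =>
      if minute > (PySem.List.slice ([45, 45, 15, 15, 0] : List Int) none (some (p + 1))).sum then
        expandLoopA minute pd rest
          (acc + ((PySem.List.pyGet? pd p).getD 0 - (PySem.List.pyGet? ([45, 45, 15, 15, 0] : List Int) p).getD 0))
      else acc

def expand_minute_py (minute : Int) (periods_duration : List Int) : Int :=
  expandLoopA minute periods_duration
    (PySem.List.pyRange 0 ((periods_duration.length : Int) - 1) 1) minute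

-- ===== PORT B =====
def expand_minute_py_alt (minute : Int) (periods_duration : List Int) : Int :=
  let regular : List Int := [45, 45, 15, 15, 0]
  let cumulative : List Int := [45, 90, 105, 120, 120]
  let n : Int := min ((periods_duration.length : Int) - 1) 5
  minute +
    (((PySem.List.pyRange 0 n 1).filter
        (fun p => minute > (PySem.List.pyGet? cumulative p).getD 0)).map
      (fun p => (PySem.List.pyGet? periods_duration p).getD 0 -
                (PySem.List.pyGet? regular p).getD 0)).sum

-- ===== PRECONDITION & SPEC =====
-- Pre_ excludes exactly the inputs where A raises IndexError: 7 or more periods with minute > 120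
-- (the loop then reaches periods_regular[5]).
def Pre_expand_minute_py (minute : Int) (periods_duration : List Int) : Prop :=
  periods_duration.length ≤ 6 ∨ minute ≤ 120

instance (minute : Int) (periods_duration : List Int) : Decidable (Pre_expand_minute_py minute periods_duration) := by unfold Pre_expand_minute_py; infer_instance

def pvWitness_expand_minute_py : Int × List Int := (50, [48, 45])


def Spec_expand_minute_py (minute : Int) (periods_duration : List Int) (out : Int) : Prop := out = expand_minute_py_alt minute periods_duration
instance (minute : Int) (periods_duration : List Int) (out : Int) : Decidable (Spec_expand_minute_py minute periods_duration out) := by unfold Spec_expand_minute_py; infer_instance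

-- ===== CLAIM (what is proved, stated in full; the proofs are below) =====
def Claim_equal_expand_minute_py : Prop := ∀ (minute : Int) (periods_duration : List Int), Dom_expand_minute_py minute periods_duration → Pre_expand_minute_py minute periods_duration → Spec_expand_minute_py minute periods_duration (expand_minute_py minute periods_duration)


-- ===== LEMMAS AND PROOFS =====

set_option maxHeartbeats 2000000 in
theorem main_lemma : ∀ (minute : Int) (periods_duration : List Int),
    Pre_expand_minute_py minute periods_duration →
    expand_minute_py minute periods_duration = expand_minute_py_alt minute periods_duration := by
  intro m pd hpre
  match pd with
  | [] =>
      have h1 : PySem.List.pyRange 0 (-1 : Int) 1 = [] := by decide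
      simp only [expand_minute_py, expand_minute_py_alt, List.length_nil]
      norm_num [h1, expandLoopA]
  | [a] =>
      have h1 : PySem.List.pyRange 0 (0 : Int) 1 = [] := by decide
      simp only [expand_minute_py, expand_minute_py_alt, List.length_cons, List.length_nil]
      norm_num [h1, expandLoopA]
  | [a, b] =>
      have h1 : PySem.List.pyRange 0 (1 : Int) 1 = [0] := by decide
      simp only [expand_minute_py, expand_minute_py_alt, List.length_cons, List.length_nil]
      norm_num [h1]
      by_cases h45 : 45 < m <;>
        simp [expandLoopA, PySem.List.pyGet?, PySem.List.slice, PySem.List.pyIdx?, List.filter,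
          h45]
  | [a, b, c] =>
      have h1 : PySem.List.pyRange 0 (2 : Int) 1 = [0, 1] := by decide
      simp only [expand_minute_py, expand_minute_py_alt, List.length_cons, List.length_nil]
      norm_num [h1]
      by_cases h45 : 45 < m <;> by_cases h90 : 90 < m <;>
        simp [expandLoopA, PySem.List.pyGet?, PySem.List.slice, PySem.List.pyIdx?, List.filter,
          h45, h90] <;> omega
  | [a, b, c, d] =>
      have h1 : PySem.List.pyRange 0 (3 : Int) 1 = [0, 1, 2] := by decide
      simp only [expand_minute_py, expand_minute_py_alt, List.length_cons, List.length_nil]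
      norm_num [h1]
      by_cases h45 : 45 < m <;> by_cases h90 : 90 < m <;> by_cases h105 : 105 < m <;>
        simp [expandLoopA, PySem.List.pyGet?, PySem.List.slice, PySem.List.pyIdx?, List.filter,
          h45, h90, h105] <;> omega
  | [a, b, c, d, e] =>
      have h1 : PySem.List.pyRange 0 (4 : Int) 1 = [0, 1, 2, 3] := by decide
      simp only [expand_minute_py, expand_minute_py_alt, List.length_cons, List.length_nil]
      norm_num [h1]
      by_cases h45 : 45 < m <;> by_cases h90 : 90 < m <;> by_cases h105 : 105 < m <;>
          by_cases h120 : 120 < m <;>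
        simp [expandLoopA, PySem.List.pyGet?, PySem.List.slice, PySem.List.pyIdx?, List.filter,
          h45, h90, h105, h120] <;> omega
  | [a, b, c, d, e, f] =>
      have h1 : PySem.List.pyRange 0 (5 : Int) 1 = [0, 1, 2, 3, 4] := by decide
      simp only [expand_minute_py, expand_minute_py_alt, List.length_cons, List.length_nil]
      norm_num [h1]
      by_cases h45 : 45 < m <;> by_cases h90 : 90 < m <;> by_cases h105 : 105 < m <;>
          by_cases h120 : 120 < m <;>
        simp [expandLoopA, PySem.List.pyGet?, PySem.List.slice, PySem.List.pyIdx?, List.filter,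
          h45, h90, h105, h120] <;> omega
  | a :: b :: c :: d :: e :: f :: g :: rest =>
      -- length ≥ 7, so Pre_ gives m ≤ 120 and the loop breaks by period 3
      have hm : m ≤ 120 := by
        rcases hpre with h | h
        · simp at h; omega
        · exact h
      set pd' := a :: b :: c :: d :: e :: f :: g :: rest with hpd
      have hL : 7 ≤ (pd'.length : Int) := by simp [hpd]; omega
      have hmin : min ((pd'.length : Int) - 1) 5 = 5 := by omega
      have hr : PySem.List.pyRange 0 ((pd'.length : Int) - 1) 1
          = 0 :: 1 :: 2 :: 3 :: PySem.List.pyRange 4 ((pd'.length : Int) - 1) 1 := by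
        rw [PySem.List.pyRange_one_cons (by omega), PySem.List.pyRange_one_cons (by omega),
            PySem.List.pyRange_one_cons (by omega), PySem.List.pyRange_one_cons (by omega)]
        norm_num
      have h5 : PySem.List.pyRange 0 (5 : Int) 1 = [0, 1, 2, 3, 4] := by decide
      simp only [expand_minute_py, expand_minute_py_alt, hmin, h5, hr]
      have h120 : ¬ (120 < m) := by omega
      by_cases h45 : 45 < m <;> by_cases h90 : 90 < m <;> by_cases h105 : 105 < m <;>
        simp [expandLoopA, hpd, PySem.List.pyGet?, PySem.List.slice, PySem.List.pyIdx?,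
          List.filter, h45, h90, h105, h120] <;> omega

-- ===== VERDICT (by name: the statement is the Claim_ definition above) =====
theorem expand_minute_py_spec : Claim_equal_expand_minute_py := by
  intro m pd _ hpre
  exact main_lemma m pd hpre
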